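-- pv_equiv track=rewrite | github.com/Xasan17/python_homeworks | lesson-19/homework/hw_19.py | group_salary
-- ===== SOURCE A (Python) =====
-- def group_salary(s):
--     i=200_000
--     t=0
--     while True:
--         if s<i:
--             return t
--         i+=200_000
--         t+=1
--         if i>1_800_000:
--             return t
-- ===== SOURCE B (Python) =====
-- def group_salary(s):
--     return max(0, min(s // 200_000, 9))
-- ===== Notes on version B (the rewrite author's own statement) =====
-- stated objective: simpler
-- what changed: Replaces the bracket-counting while-loop with a closed-form floor division clamped to [0, 9].
import Mathlib
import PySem

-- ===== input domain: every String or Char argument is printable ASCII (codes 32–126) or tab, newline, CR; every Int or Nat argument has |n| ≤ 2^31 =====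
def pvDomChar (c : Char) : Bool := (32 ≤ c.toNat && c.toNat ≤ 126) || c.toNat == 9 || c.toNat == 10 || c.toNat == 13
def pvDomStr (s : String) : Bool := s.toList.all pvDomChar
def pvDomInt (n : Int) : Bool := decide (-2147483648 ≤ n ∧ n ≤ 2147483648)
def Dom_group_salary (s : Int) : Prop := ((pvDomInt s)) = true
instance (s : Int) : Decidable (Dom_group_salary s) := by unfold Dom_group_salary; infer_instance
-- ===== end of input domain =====

-- B replaces A's bracket-counting while-loop by a closed-form floor division clamped to [0, 9] (same value everywhere).

-- ===== PORT A =====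
-- A's `while True` loop: state (i, t); i grows by 200000 each pass, loop exits once i > 1800000.
def group_salary_loop (s i t : Int) : Int :=
  if s < i then t
  else if i + 200000 > 1800000 then t + 1
  else group_salary_loop s (i + 200000) (t + 1)
termination_by (1800000 - i).toNat
decreasing_by omega

def group_salary (s : Int) : Int := group_salary_loop s 200000 0

-- ===== PORT B =====
def group_salary_alt (s : Int) : Int := max 0 (min (PySem.Int.floordiv s 200000) 9)

-- ===== PRECONDITION & SPEC =====
def Spec_group_salary (s : Int) (out : Int) : Prop := out = group_salary_alt s
instance (s : Int) (out : Int) : Decidable (Spec_group_salary s out) := by unfold Spec_group_salary; infer_instance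

-- ===== CLAIM (what is proved, stated in full; the proofs are below) =====
def Claim_equal_group_salary : Prop := ∀ (s : Int), Dom_group_salary s → Spec_group_salary s (group_salary s)

-- ===== LEMMAS AND PROOFS =====
theorem group_salary_loop_eq (n : Nat) :
    ∀ s t : Int, 0 ≤ t → t + (n : Int) = 8 → (200000 * t ≤ s ∨ t = 0) →
      group_salary_loop s (200000 * (t + 1)) t = max 0 (min (s / 200000) 9) := by
  induction n with
  | zero =>
    intro s t ht heq hs
    have ht8 : t = 8 := by omega
    subst ht8
    rw [group_salary_loop]
    split_ifs <;> omega
  | succ m ih =>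
    intro s t ht heq hs
    have htle : t ≤ 7 := by omega
    rw [group_salary_loop]
    split_ifs with h1 h2
    · omega
    · exfalso; omega
    · have hrec := ih s (t + 1) (by omega) (by push_cast at heq ⊢; omega) (by omega)
      rw [show 200000 * (t + 1) + 200000 = 200000 * ((t + 1) + 1) by ring]
      exact hrec

theorem group_salary_eq_alt (s : Int) : group_salary s = group_salary_alt s := by
  unfold group_salary group_salary_alt
  rw [PySem.Int.floordiv_eq_ediv_of_pos (by norm_num)]
  have h := group_salary_loop_eq 8 s 0 (by omega) (by norm_num) (Or.inr rfl)
  norm_num at h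
  exact h
-- ===== VERDICT (by name: the statement is the Claim_ definition above) =====
theorem group_salary_spec : Claim_equal_group_salary := by
  intro s _
  unfold Spec_group_salary
  exact group_salary_eq_alt s
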